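-- pv_equiv track=rewrite | github.com/UCD-Neuromuscular-Systems-Research/neurally | src/scripts/HD/preProcessingAudioLongitudinal.py | getOnsetOffsetSV
-- ===== SOURCE A (Python) =====
-- def getOnsetOffsetSV(data, threshold):
--
--     # Ensure data is not empty and has at least two samples:
--     if data is None or len(data) < 2:
--         return [], []
--
--     # Initialise lists for onsets and offsets:
--     onsets = []
--     offsets = []
--     BelowThresh = True                          # Assume the signal starts below the threshold.
--
--     for i in range(len(data) - 1):              # Prevent index out of bounds.
--
--         if BelowThresh and data[i] > threshold and data[i + 1] > threshold:
--             onsets.append(i)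
--             BelowThresh = False
--         elif not BelowThresh and data[i] < threshold and data[i + 1] < threshold:
--             offsets.append(i)
--             BelowThresh = True
--
--     # Clean up unmatched onset/offset pairs:
--     if offsets and onsets and offsets[0] < onsets[0]:
--         del offsets[0]
--     if onsets and offsets and onsets[-1] > offsets[-1]:
--         del onsets[-1]
--
--     return onsets, offsets
-- ===== SOURCE B (Python) =====
-- def getOnsetOffsetSV(data, threshold):
--     # B: no stateful below/above toggle. Stage 1 lists the candidate pair events,
--     # stage 2 drops everything before the first above-run, stage 3 keeps the first
--     # event of each maximal run of equal type (adjacent dedup by type), stage 4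
--     # partitions picks by type and trims the unmatched trailing onset by count.
--     if data is None or len(data) < 2:
--         return [], []
--     events = [(i, a > threshold)
--               for i, (a, b) in enumerate(zip(data, data[1:]))
--               if (a > threshold and b > threshold) or (a < threshold and b < threshold)]
--     k = next((j for j, e in enumerate(events) if e[1]), len(events))
--     events = events[k:]
--     picks = events[:1] + [e for prev, e in zip(events, events[1:]) if e[1] != prev[1]]
--     onsets = [i for i, up in picks if up]
--     offsets = [i for i, up in picks if not up]
--     if offsets and len(offsets) < len(onsets):
--         onsets.pop()
--     return onsets, offsets
-- ===== Notes on version B (the rewrite author's own statement) =====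
-- stated objective: alternative
-- what changed: B replaces A's stateful below/above toggle scan by a stateless staged pipeline: list candidate pair events, drop everything before the first above-event, keep the first event of each maximal run of equal type by adjacent dedup, partition the picks by type, and trim the unmatched trailing onset by count.
import Mathlib
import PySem

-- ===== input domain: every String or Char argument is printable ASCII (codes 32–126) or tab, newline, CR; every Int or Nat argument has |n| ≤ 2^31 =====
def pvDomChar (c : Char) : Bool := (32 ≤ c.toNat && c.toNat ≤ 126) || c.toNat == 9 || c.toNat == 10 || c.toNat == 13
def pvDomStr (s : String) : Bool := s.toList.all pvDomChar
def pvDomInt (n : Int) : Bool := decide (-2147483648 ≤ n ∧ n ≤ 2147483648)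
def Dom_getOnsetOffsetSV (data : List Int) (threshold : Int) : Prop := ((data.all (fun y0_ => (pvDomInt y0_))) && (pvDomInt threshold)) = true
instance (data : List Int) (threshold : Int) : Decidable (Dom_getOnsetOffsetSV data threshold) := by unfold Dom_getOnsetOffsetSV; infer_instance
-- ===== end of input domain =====

-- B replaces A's stateful toggle scan by a stateless staged pipeline (candidate events →
-- drop leading below-events → adjacent dedup by type → partition + count trim); same O(n)
-- cost (objective: alternative).

-- ===== PORT A =====
-- the body of A's for-loop over i in range(len(data)-1); state = (onsets, offsets, BelowThresh)
def pvStepA (data : List Int) (threshold : Int) (s : List Int × List Int × Bool) (i : Int) :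
    List Int × List Int × Bool :=
  if s.2.2 = true ∧ threshold < PySem.List.pyGetD data i 0 ∧ threshold < PySem.List.pyGetD data (i + 1) 0 then
    (s.1 ++ [i], s.2.1, false)
  else if s.2.2 = false ∧ PySem.List.pyGetD data i 0 < threshold ∧ PySem.List.pyGetD data (i + 1) 0 < threshold then
    (s.1, s.2.1 ++ [i], true)
  else s

def getOnsetOffsetSV (data : List Int) (threshold : Int) : List Int × List Int :=
  if data.length < 2 then ([], [])
  else
    let st := (PySem.List.pyRange 0 ((data.length : Int) - 1) 1).foldl (pvStepA data threshold) ([], [], true)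
    let onsets := st.1
    let offsets := st.2.1
    -- if offsets and onsets and offsets[0] < onsets[0]: del offsets[0]
    let offsets2 :=
      if offsets ≠ [] ∧ onsets ≠ [] ∧ PySem.List.pyGetD offsets 0 0 < PySem.List.pyGetD onsets 0 0
      then offsets.tail else offsets
    -- if onsets and offsets and onsets[-1] > offsets[-1]: del onsets[-1]
    let onsets2 :=
      if onsets ≠ [] ∧ offsets2 ≠ [] ∧ PySem.List.pyGetD offsets2 (-1) 0 < PySem.List.pyGetD onsets (-1) 0
      then onsets.dropLast else onsets
    (onsets2, offsets2)

-- ===== PORT B =====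
-- stage 1: candidate events over consecutive pairs — (index, both-above?) kept only when
-- both samples are strictly above or both strictly below the threshold
def pvEvents (data : List Int) (threshold : Int) : List (Int × Bool) :=
  (PySem.List.enumerate (data.zip data.tail)).filterMap (fun p =>
    if (threshold < p.2.1 ∧ threshold < p.2.2) ∨ (p.2.1 < threshold ∧ p.2.2 < threshold)
    then some (p.1, decide (threshold < p.2.1)) else none)

-- stage 3: events[:1] + [e for prev, e in zip(events, events[1:]) if e[1] != prev[1]]
def pvPicks (events : List (Int × Bool)) : List (Int × Bool) :=
  match events with
  | [] => []
  | e :: _ => e :: ((events.zip events.tail).filterMap fun p =>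
      if p.2.2 ≠ p.1.2 then some p.2 else none)

def pvUps (l : List (Int × Bool)) : List Int :=
  l.filterMap (fun e => if e.2 then some e.1 else none)

def pvDowns (l : List (Int × Bool)) : List Int :=
  l.filterMap (fun e => if e.2 then none else some e.1)

def getOnsetOffsetSV_alt (data : List Int) (threshold : Int) : List Int × List Int :=
  if data.length < 2 then ([], [])
  else
    -- stage 2: drop everything before the first above-event
    let picks := pvPicks ((pvEvents data threshold).dropWhile (fun e => e.2 == false))
    let onsets := pvUps picks
    let offsets := pvDowns picks
    if offsets ≠ [] ∧ offsets.length < onsets.length then (onsets.dropLast, offsets)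
    else (onsets, offsets)

-- ===== PRECONDITION & SPEC =====
def Spec_getOnsetOffsetSV (data : List Int) (threshold : Int) (out : List Int × List Int) : Prop := out = getOnsetOffsetSV_alt data threshold
instance (data : List Int) (threshold : Int) (out : List Int × List Int) : Decidable (Spec_getOnsetOffsetSV data threshold out) := by unfold Spec_getOnsetOffsetSV; infer_instance

-- ===== CLAIM (what is proved, stated in full; the proofs are below) =====
def Claim_equal_getOnsetOffsetSV : Prop := ∀ (data : List Int) (threshold : Int), Dom_getOnsetOffsetSV data threshold → Spec_getOnsetOffsetSV data threshold (getOnsetOffsetSV data threshold)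

-- ===== LEMMAS AND PROOFS =====

-- A's state machine, abstracted to a list of tagged events; used only in the proofs
def pvStepB (s : List Int × List Int × Bool) (e : Int × Bool) : List Int × List Int × Bool :=
  if s.2.2 = true ∧ e.2 = true then (s.1 ++ [e.1], s.2.1, false)
  else if s.2.2 = false ∧ e.2 = false then (s.1, s.2.1 ++ [e.1], true)
  else s

-- the loop body of A, re-expressed on an (index, pair) element
def pvStepP (threshold : Int) (s : List Int × List Int × Bool) (q : Int × Int × Int) :
    List Int × List Int × Bool :=
  if s.2.2 = true ∧ threshold < q.2.1 ∧ threshold < q.2.2 then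
    (s.1 ++ [q.1], s.2.1, false)
  else if s.2.2 = false ∧ q.2.1 < threshold ∧ q.2.2 < threshold then
    (s.1, s.2.1 ++ [q.1], true)
  else s

-- A's fold over range(len-1) equals the pair-indexed fold over enumerate(zip(data, data[1:]))
lemma pv_foldA_eq_foldP (data : List Int) (threshold : Int) (s0 : List Int × List Int × Bool)
    (h2 : 2 ≤ data.length) :
    (PySem.List.pyRange 0 ((data.length : Int) - 1) 1).foldl (pvStepA data threshold) s0 =
      (PySem.List.enumerate (data.zip data.tail)).foldl (pvStepP threshold) s0 := by
  have hzlen : (data.zip data.tail).length = data.length - 1 := by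
    rw [List.length_zip, List.length_tail]; omega
  have hlen : ((data.length : Int) - 1) = ((data.zip data.tail).length : Int) := by
    rw [hzlen]; omega
  rw [hlen, PySem.List.enumerate_eq_map_pyRange (data.zip data.tail) (0, 0), List.foldl_map]
  have hrange : PySem.List.pyRange 0 ((data.zip data.tail).length : Int) 1 =
      PySem.List.pyRange 0 (PySem.List.len (data.zip data.tail)) := rfl
  rw [hrange]
  apply PySem.List.foldl_congr_mem
  intro acc j hj
  rw [PySem.List.mem_pyRange_one] at hj
  obtain ⟨hj0, hj1⟩ := hj
  have hjz : j < ((data.zip data.tail).length : Int) := hj1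
  have hk : j.toNat < (data.zip data.tail).length := by omega
  have hk' : j.toNat < data.length - 1 := by rw [hzlen] at hk; exact hk
  have hgp : PySem.List.pyGetD (data.zip data.tail) j (0, 0) = (data.zip data.tail)[j.toNat] :=
    PySem.List.pyGetD_eq_getElem _ _ hj0 hjz
  have hpair : (data.zip data.tail)[j.toNat] = (data[j.toNat], data[j.toNat + 1]) := by
    rw [List.getElem_zip]; rw [List.getElem_tail]
  have hga : PySem.List.pyGetD data j 0 = data[j.toNat] :=
    PySem.List.pyGetD_eq_getElem _ _ hj0 (by omega)
  have hgb : PySem.List.pyGetD data (j + 1) 0 = data[j.toNat + 1] := by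
    have := PySem.List.pyGetD_eq_getElem data (i := j + 1) 0 (by omega) (by push_cast; omega)
    rw [this]
    congr 1
    omega
  simp only [pvStepA, pvStepP, hgp, hpair, hga, hgb]

-- a fold whose body ignores exactly the elements a filterMap drops equals the fold over the filterMap
lemma pv_foldl_filterMap {α β σ : Type} (f : α → Option β) (g : σ → α → σ) (h : σ → β → σ)
    (l : List α)
    (hnone : ∀ s a, f a = none → g s a = s)
    (hsome : ∀ s a b, f a = some b → g s a = h s b) :
    ∀ s : σ, l.foldl g s = (l.filterMap f).foldl h s := by
  induction l with
  | nil => intro s; simp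
  | cons a l ih =>
    intro s
    cases hf : f a with
    | none => simp [List.filterMap_cons, hf, hnone s a hf, ih]
    | some b => simp [List.filterMap_cons, hf, hsome s a b hf, ih]

-- the pair-indexed fold equals the abstract state machine over the candidate-event list
lemma pv_foldP_eq_foldB (data : List Int) (threshold : Int) (s0 : List Int × List Int × Bool) :
    (PySem.List.enumerate (data.zip data.tail)).foldl (pvStepP threshold) s0 =
      (pvEvents data threshold).foldl pvStepB s0 := by
  unfold pvEvents
  apply pv_foldl_filterMap
  · intro s q hq
    split at hq
    · exact absurd hq (by simp)
    · rename_i hcond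
      push_neg at hcond
      unfold pvStepP
      rw [if_neg, if_neg]
      · rintro ⟨-, ha, hb⟩
        have := hcond.2 ha
        omega
      · rintro ⟨-, ha, hb⟩
        have := hcond.1 ha
        omega
  · intro s q b hq
    split at hq
    · rename_i hcond
      cases hq
      rcases hcond with ⟨ha, hb⟩ | ⟨ha, hb⟩
      · have hd : decide (threshold < q.2.1) = true := by simpa using ha
        unfold pvStepP pvStepB
        by_cases hbl : s.2.2 = true
        · rw [if_pos ⟨hbl, ha, hb⟩, if_pos ⟨hbl, hd⟩]
        · rw [if_neg (fun hc => hbl hc.1), if_neg (by rintro ⟨-, h2, -⟩; omega),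
              if_neg (fun hc => hbl hc.1), if_neg (by rintro ⟨-, h2⟩; rw [hd] at h2; cases h2)]
      · have hd : decide (threshold < q.2.1) = false := by simp; omega
        unfold pvStepP pvStepB
        by_cases hbl : s.2.2 = false
        · rw [if_neg (by rintro ⟨h1, -⟩; rw [hbl] at h1; cases h1), if_pos ⟨hbl, ha, hb⟩,
              if_neg (by rintro ⟨h1, -⟩; rw [hbl] at h1; cases h1), if_pos ⟨hbl, hd⟩]
        · rw [if_neg (by rintro ⟨-, h2, -⟩; omega), if_neg (fun hc => hbl hc.1),
              if_neg (by rintro ⟨-, h2⟩; rw [hd] at h2; cases h2), if_neg (fun hc => hbl hc.1)]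
    · cases hq

-- the events the machine records, and its final flag, from a given flag
def pvTaken (bl : Bool) : List (Int × Bool) → List (Int × Bool)
  | [] => []
  | e :: es => if e.2 = bl then e :: pvTaken (!bl) es else pvTaken bl es

def pvFlag (bl : Bool) : List (Int × Bool) → Bool
  | [] => bl
  | e :: es => if e.2 = bl then pvFlag (!bl) es else pvFlag bl es

-- the machine's fold decomposes into the recorded events, split by type
lemma pv_fold_taken (es : List (Int × Bool)) :
    ∀ (bl : Bool) (ons offs : List Int),
      es.foldl pvStepB (ons, offs, bl) =
        (ons ++ pvUps (pvTaken bl es), offs ++ pvDowns (pvTaken bl es), pvFlag bl es) := by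
  induction es with
  | nil => intro bl ons offs; simp [pvTaken, pvFlag, pvUps, pvDowns]
  | cons e es ih =>
    intro bl ons offs
    rw [List.foldl_cons]
    by_cases he : e.2 = bl
    · cases bl
      · have he' : e.2 = false := he
        have hstep : pvStepB (ons, offs, false) e = (ons, offs ++ [e.1], true) := by
          unfold pvStepB
          rw [if_neg (by rintro ⟨h, -⟩; cases h), if_pos ⟨rfl, he'⟩]
        rw [hstep, ih, pvTaken, pvFlag, if_pos he, if_pos he]
        simp [pvUps, pvDowns, List.filterMap_cons, he']
      · have he' : e.2 = true := he
        have hstep : pvStepB (ons, offs, true) e = (ons ++ [e.1], offs, false) := by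
          unfold pvStepB
          rw [if_pos ⟨rfl, he'⟩]
        rw [hstep, ih, pvTaken, pvFlag, if_pos he, if_pos he]
        simp [pvUps, pvDowns, List.filterMap_cons, he']
    · have hstep : pvStepB (ons, offs, bl) e = (ons, offs, bl) := by
        unfold pvStepB
        cases bl
        · rw [if_neg (by rintro ⟨h, -⟩; cases h), if_neg (by rintro ⟨-, h⟩; exact he h)]
        · rw [if_neg (by rintro ⟨-, h⟩; exact he h), if_neg (by rintro ⟨h, -⟩; cases h)]
      rw [hstep, ih, pvTaken, pvFlag, if_neg he, if_neg he]

-- from the below state the machine skips every leading below-event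
lemma pv_taken_dropWhile (es : List (Int × Bool)) :
    pvTaken true es = pvTaken true (es.dropWhile (fun e => e.2 == false)) := by
  induction es with
  | nil => rfl
  | cons e es ih =>
    by_cases he : e.2 = false
    · rw [pvTaken, if_neg (by simp [he]), ih, List.dropWhile_cons,
          if_pos (by simp [he])]
    · rw [List.dropWhile_cons, if_neg (by simpa using he)]

-- alternating take after a recorded event = adjacent dedup paired with the previous event
lemma pv_taken_zip (es : List (Int × Bool)) :
    ∀ e : Int × Bool,
      pvTaken (!e.2) es =
        ((e :: es).zip es).filterMap (fun p => if p.2.2 ≠ p.1.2 then some p.2 else none) := by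
  induction es with
  | nil => intro e; rfl
  | cons x rest ih =>
    intro e
    rw [pvTaken, List.zip_cons_cons, List.filterMap_cons]
    by_cases hx : x.2 = e.2
    · rw [if_neg (by rw [hx]; cases e.2 <;> decide), show (!e.2) = (!x.2) from by rw [hx], ih x]
      simp [hx]
    · have hx' : x.2 = !e.2 := by cases hxe : e.2 <;> cases hxx : x.2 <;> simp_all
      rw [if_pos hx', show (!!e.2) = (!x.2) from by rw [hx'], ih x]
      simp [hx]

-- the machine's recorded events are exactly B's picks
lemma pv_taken_picks (es : List (Int × Bool)) :
    pvTaken true es = pvPicks (es.dropWhile (fun e => e.2 == false)) := by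
  rw [pv_taken_dropWhile]
  generalize hd : es.dropWhile (fun e => e.2 == false) = ds
  cases ds with
  | nil => rfl
  | cons e rest =>
    have he : e.2 = true := by
      have := List.head?_dropWhile_not (fun e : Int × Bool => e.2 == false) es
      rw [hd] at this
      simpa using this
    rw [pvTaken, if_pos he, pvPicks]
    rw [show (!true) = (!e.2) by rw [he]]
    rw [pv_taken_zip rest e]
    rfl

-- the state-machine invariant: counts alternate, the first offset follows the first onset,
-- and the last recorded index belongs to the side the flag says was recorded last
def pvInv (st : List Int × List Int × Bool) : Prop :=
  (st.2.2 = true → st.1.length = st.2.1.length) ∧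
  (st.2.2 = false → st.1.length = st.2.1.length + 1) ∧
  (st.2.1 ≠ [] → st.1 ≠ [] ∧ st.1.headD 0 < st.2.1.headD 0) ∧
  (st.2.2 = false → st.2.1 ≠ [] → st.2.1.getLastD 0 < st.1.getLastD 0) ∧
  (st.2.2 = true → st.1 ≠ [] → st.2.1 ≠ [] → st.1.getLastD 0 < st.2.1.getLastD 0)

lemma pv_getLastD_mem {l : List Int} (h : l ≠ []) : l.getLastD 0 ∈ l := by
  rw [List.getLastD_eq_getLast?, List.getLast?_eq_getLast h]
  exact List.getLast_mem h

lemma pv_headD_append {l : List Int} (x d : Int) (h : l ≠ []) : (l ++ [x]).headD d = l.headD d := by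
  cases l with
  | nil => exact absurd rfl h
  | cons a l => simp

-- running the machine from a state satisfying the invariant, over events with strictly
-- increasing indices all above every recorded index, preserves the invariant
lemma pv_run_inv (es : List (Int × Bool)) :
    ∀ st : List Int × List Int × Bool,
      es.Pairwise (fun e e' => e.1 < e'.1) →
      (∀ e ∈ es, (∀ x ∈ st.1, x < e.1) ∧ (∀ x ∈ st.2.1, x < e.1)) →
      pvInv st → pvInv (es.foldl pvStepB st) := by
  induction es with
  | nil => intro st _ _ hinv; exact hinv
  | cons e es ih =>
    intro st hpw hbnd hinv
    rw [List.foldl_cons]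
    obtain ⟨hc1, hc2, hc3, hc4, hc5⟩ := hinv
    obtain ⟨hbon, hboff⟩ := hbnd e (by simp)
    have hpw' : es.Pairwise (fun e e' => e.1 < e'.1) := hpw.tail
    have hlt : ∀ e' ∈ es, e.1 < e'.1 := (List.pairwise_cons.mp hpw).1
    have hstep : (∀ x ∈ (pvStepB st e).1, x ∈ st.1 ∨ x = e.1) ∧
        (∀ x ∈ (pvStepB st e).2.1, x ∈ st.2.1 ∨ x = e.1) := by
      unfold pvStepB
      split_ifs with h1 h2
      · refine ⟨fun x hx => ?_, fun x hx => Or.inl hx⟩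
        rcases List.mem_append.mp hx with h | h
        · exact Or.inl h
        · simp at h; exact Or.inr h
      · refine ⟨fun x hx => Or.inl hx, fun x hx => ?_⟩
        rcases List.mem_append.mp hx with h | h
        · exact Or.inl h
        · simp at h; exact Or.inr h
      · exact ⟨fun x hx => Or.inl hx, fun x hx => Or.inl hx⟩
    apply ih
    · exact hpw'
    · intro e' he'
      constructor
      · intro x hx
        rcases hstep.1 x hx with h | h
        · exact (hbnd e' (by simp [he'])).1 x h
        · rw [h]; exact hlt e' he'
      · intro x hx
        rcases hstep.2 x hx with h | h
        · exact (hbnd e' (by simp [he'])).2 x h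
        · rw [h]; exact hlt e' he'
    · -- pvInv (pvStepB st e)
      unfold pvStepB
      split_ifs with h1 h2
      · -- onset recorded: (ons ++ [e.1], offs, false)
        obtain ⟨hbl, -⟩ := h1
        refine ⟨by simp, ?_, ?_, ?_, by simp⟩
        · intro _
          simp [hc1 hbl]
        · intro hoff
          have := hc3 hoff
          refine ⟨by simp, ?_⟩
          rw [pv_headD_append _ _ this.1]
          exact this.2
        · intro _ hoff
          rw [List.getLastD_concat]
          exact hboff _ (pv_getLastD_mem hoff)
      · -- offset recorded: (ons, offs ++ [e.1], true)
        obtain ⟨hbl, -⟩ := h2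
        have hlen := hc2 hbl
        have honne : st.1 ≠ [] := by
          intro h; rw [h] at hlen; simp at hlen
        refine ⟨?_, by simp, ?_, by simp, ?_⟩
        · intro _; simp [hlen]
        · intro _
          refine ⟨honne, ?_⟩
          by_cases hoff : st.2.1 = []
          · have hm : st.1.headD 0 ∈ st.1 := by
              cases hst : st.1 with
              | nil => exact absurd hst honne
              | cons a l => simp [hst]
            rw [hoff, List.nil_append]
            simpa using hbon _ hm
          · rw [pv_headD_append _ _ hoff]
            exact (hc3 hoff).2
        · intro _ _ _
          rw [List.getLastD_concat]
          exact hbon _ (pv_getLastD_mem honne)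
      · exact ⟨hc1, hc2, hc3, hc4, hc5⟩

lemma pv_events_pairwise (data : List Int) (threshold : Int) :
    (pvEvents data threshold).Pairwise (fun e e' => e.1 < e'.1) := by
  unfold pvEvents
  rw [List.pairwise_filterMap]
  apply List.Pairwise.imp _ (PySem.List.pairwise_lt_enumerate (data.zip data.tail) 0)
  intro p q hpq b hb b' hb'
  split at hb
  · cases hb
    split at hb'
    · cases hb'; exact hpq
    · cases hb'
  · cases hb

-- the machine's final state satisfies the invariant
lemma pv_final_inv (data : List Int) (threshold : Int) :
    pvInv ((pvEvents data threshold).foldl pvStepB ([], [], true)) := by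
  apply pv_run_inv
  · exact pv_events_pairwise data threshold
  · intro e _; exact ⟨by simp, by simp⟩
  · exact ⟨fun _ => rfl, by simp, by simp, by simp, by simp⟩

-- pyGetD at 0 / -1 on a nonempty list is headD / getLastD
lemma pv_pyGetD_zero_headD (l : List Int) : PySem.List.pyGetD l 0 0 = l.headD 0 := by
  rw [PySem.List.pyGetD_zero]
  cases l <;> simp

lemma pv_pyGetD_neg_one_getLastD (l : List Int) (h : l ≠ []) :
    PySem.List.pyGetD l (-1) 0 = l.getLastD 0 := by
  rw [PySem.List.pyGetD_neg_one l 0 h, List.getLastD_eq_getLast?, List.getLast?_eq_getLast h]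
  rfl

-- ===== VERDICT (by name: the statement is the Claim_ definition above) =====
theorem getOnsetOffsetSV_spec : Claim_equal_getOnsetOffsetSV := by
  intro data threshold _
  unfold Spec_getOnsetOffsetSV getOnsetOffsetSV getOnsetOffsetSV_alt
  by_cases hlen : data.length < 2
  · simp [hlen]
  · rw [if_neg hlen, if_neg hlen]
    have h2 : 2 ≤ data.length := by omega
    rw [pv_foldA_eq_foldP data threshold _ h2, pv_foldP_eq_foldB]
    simp only []
    set st := (pvEvents data threshold).foldl pvStepB ([], [], true) with hst
    set P := pvPicks ((pvEvents data threshold).dropWhile (fun e => e.2 == false)) with hP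
    have h1 : st.1 = pvUps P := by
      rw [hst, pv_fold_taken, pv_taken_picks, ← hP]; simp
    have h2' : st.2.1 = pvDowns P := by
      rw [hst, pv_fold_taken, pv_taken_picks, ← hP]; simp
    rw [← h1, ← h2']
    obtain ⟨hc1, hc2, hc3, hc4, hc5⟩ := pv_final_inv data threshold
    rw [← hst] at hc1 hc2 hc3 hc4 hc5
    -- A's first cleanup never fires
    have hoffs2 : (if st.2.1 ≠ [] ∧ st.1 ≠ [] ∧ PySem.List.pyGetD st.2.1 0 0 < PySem.List.pyGetD st.1 0 0
        then st.2.1.tail else st.2.1) = st.2.1 := by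
      rw [if_neg]
      rintro ⟨hoff, _, hlt⟩
      rw [pv_pyGetD_zero_headD, pv_pyGetD_zero_headD] at hlt
      exact absurd hlt (not_lt_of_gt (hc3 hoff).2)
    simp only [hoffs2]
    -- A's second cleanup fires exactly when B's count-based trim does
    by_cases hbl : st.2.2 = true
    · have hlens := hc1 hbl
      rw [if_neg, if_neg]
      · rintro ⟨-, hlt⟩; omega
      · rintro ⟨hon, hoff, hlt⟩
        rw [pv_pyGetD_neg_one_getLastD _ hoff, pv_pyGetD_neg_one_getLastD _ hon] at hlt
        exact absurd hlt (not_lt_of_gt (hc5 hbl hon hoff))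
    · have hbl' : st.2.2 = false := by cases h : st.2.2 <;> simp_all
      have hlens := hc2 hbl'
      have hon : st.1 ≠ [] := by intro h; rw [h] at hlens; simp at hlens
      by_cases hoff : st.2.1 = []
      · rw [if_neg (by tauto), if_neg (by tauto)]
      · rw [if_pos, if_pos ⟨hoff, by omega⟩]
        refine ⟨hon, hoff, ?_⟩
        rw [pv_pyGetD_neg_one_getLastD _ hoff, pv_pyGetD_neg_one_getLastD _ hon]
        exact hc4 hbl' hoff
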